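-- pv_equiv track=rewrite | github.com/adminiavs/The-Architect | Examples/gqe_compression/tests/test_08_semantic_geometry.py | generate_semantic_corpus
-- ===== SOURCE A (Python) =====
-- def generate_semantic_corpus(target_size: int) -> str:
--     """
--     Generate Corpus B: SEMANTIC text.
--
--     Different words with similar/related meanings.
--     No exact repetition, but rich semantic structure.
--
--     This is GQE's ideal case - meaning without repetition.
--     """
--     # Semantic clusters - words that should map to nearby E8 points
--     royalty_cluster = [
--         "The monarch ruled the vast kingdom with wisdom and grace.",
--         "The queen sat upon the golden throne in the palace.",
--         "The king governed his realm with fairness and strength.",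
--         "The emperor commanded the empire from his royal court.",
--         "The sovereign reigned over the prosperous nation.",
--         "The ruler administered the territory with just laws.",
--         "The prince inherited the crown from his noble father.",
--         "The duchess presided over the grand ceremony.",
--     ]
--
--     motion_cluster = [
--         "The athlete sprinted across the finish line swiftly.",
--         "The runner dashed through the winding forest path.",
--         "The dancer leaped gracefully across the wooden stage.",
--         "The horse galloped over the green meadow quickly.",
--         "The cheetah raced across the African savanna.",
--         "The swimmer glided through the crystal clear water.",
--         "The cyclist pedaled up the steep mountain road.",
--         "The skater slid across the frozen ice rink.",
--     ]
--
--     nature_cluster = [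
--         "The ancient oak tree towered over the peaceful forest.",
--         "The mighty redwood grew tall in the misty grove.",
--         "The willow branches swayed gently by the river.",
--         "The pine needles carpeted the quiet woodland floor.",
--         "The maple leaves turned brilliant colors in autumn.",
--         "The birch bark gleamed white in the morning light.",
--         "The cedar forest filled the air with fragrance.",
--         "The elm branches spread wide over the garden.",
--     ]
--
--     thought_cluster = [
--         "The philosopher contemplated the nature of existence.",
--         "The thinker pondered the mysteries of consciousness.",
--         "The scholar reflected on ancient wisdom traditions.",
--         "The sage meditated upon the meaning of life.",
--         "The intellectual analyzed complex theoretical problems.",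
--         "The theorist considered abstract mathematical concepts.",
--         "The academic studied the foundations of knowledge.",
--         "The visionary imagined possibilities beyond reality.",
--     ]
--
--     all_clusters = royalty_cluster + motion_cluster + nature_cluster + thought_cluster
--
--     corpus = []
--     current_size = 0
--     idx = 0
--
--     # Interleave from different clusters to maximize semantic variety
--     while current_size < target_size:
--         sentence = all_clusters[idx % len(all_clusters)]
--         corpus.append(sentence)
--         current_size += len(sentence) + 1
--         idx += 1
--
--     return ' '.join(corpus)[:target_size]
-- ===== SOURCE B (Python) =====
-- def generate_semantic_corpus(target_size: int) -> str:
--     """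
--     Generate Corpus B: SEMANTIC text.
--
--     Closed-form version: the number of full cycles through the fixed
--     sentence list is computed by integer division instead of looping
--     sentence by sentence; only the final partial cycle is scanned.
--     """
--     royalty_cluster = [
--         "The monarch ruled the vast kingdom with wisdom and grace.",
--         "The queen sat upon the golden throne in the palace.",
--         "The king governed his realm with fairness and strength.",
--         "The emperor commanded the empire from his royal court.",
--         "The sovereign reigned over the prosperous nation.",
--         "The ruler administered the territory with just laws.",
--         "The prince inherited the crown from his noble father.",
--         "The duchess presided over the grand ceremony.",
--     ]
--
--     motion_cluster = [
--         "The athlete sprinted across the finish line swiftly.",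
--         "The runner dashed through the winding forest path.",
--         "The dancer leaped gracefully across the wooden stage.",
--         "The horse galloped over the green meadow quickly.",
--         "The cheetah raced across the African savanna.",
--         "The swimmer glided through the crystal clear water.",
--         "The cyclist pedaled up the steep mountain road.",
--         "The skater slid across the frozen ice rink.",
--     ]
--
--     nature_cluster = [
--         "The ancient oak tree towered over the peaceful forest.",
--         "The mighty redwood grew tall in the misty grove.",
--         "The willow branches swayed gently by the river.",
--         "The pine needles carpeted the quiet woodland floor.",
--         "The maple leaves turned brilliant colors in autumn.",
--         "The birch bark gleamed white in the morning light.",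
--         "The cedar forest filled the air with fragrance.",
--         "The elm branches spread wide over the garden.",
--     ]
--
--     thought_cluster = [
--         "The philosopher contemplated the nature of existence.",
--         "The thinker pondered the mysteries of consciousness.",
--         "The scholar reflected on ancient wisdom traditions.",
--         "The sage meditated upon the meaning of life.",
--         "The intellectual analyzed complex theoretical problems.",
--         "The theorist considered abstract mathematical concepts.",
--         "The academic studied the foundations of knowledge.",
--         "The visionary imagined possibilities beyond reality.",
--     ]
--
--     all_clusters = royalty_cluster + motion_cluster + nature_cluster + thought_cluster
--
--     if target_size <= 0:
--         return ''
--
--     cycle_cost = sum(len(s) + 1 for s in all_clusters)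
--     q = (target_size - 1) // cycle_cost          # full cycles that fit strictly below target
--     rem = target_size - q * cycle_cost           # 1 <= rem <= cycle_cost
--
--     parts = all_clusters * q
--     acc = 0
--     for s in all_clusters:
--         parts.append(s)
--         acc += len(s) + 1
--         if acc >= rem:
--             break
--
--     return ' '.join(parts)[:target_size]
-- ===== Notes on version B (the rewrite author's own statement) =====
-- stated objective: alternative
-- what changed: The per-sentence while-loop accumulation is replaced by a closed-form integer-division count of full cycles through the fixed sentence list (built by list repetition) plus a single scan of the final partial cycle; fewer interpreter-level iterations, same overall O(n) cost (the join dominates).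
import Mathlib
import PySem

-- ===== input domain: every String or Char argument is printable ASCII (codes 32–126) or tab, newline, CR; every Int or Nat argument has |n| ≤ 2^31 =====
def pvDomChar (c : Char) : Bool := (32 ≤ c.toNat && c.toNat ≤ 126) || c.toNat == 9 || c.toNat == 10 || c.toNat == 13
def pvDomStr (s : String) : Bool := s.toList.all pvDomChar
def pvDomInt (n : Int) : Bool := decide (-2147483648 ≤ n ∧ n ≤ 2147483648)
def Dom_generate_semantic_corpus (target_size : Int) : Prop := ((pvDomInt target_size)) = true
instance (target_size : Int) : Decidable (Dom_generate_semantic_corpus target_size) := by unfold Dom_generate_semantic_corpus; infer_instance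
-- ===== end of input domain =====

-- B replaces A's sentence-by-sentence accumulation loop by an integer-division count of
-- full cycles plus a single scan of the final partial cycle (objective: alternative decomposition).

-- ===== PORT A =====
-- the four fixed sentence lists of the Python source (shared verbatim by both programs)
def royalty_cluster : List String := [
  "The monarch ruled the vast kingdom with wisdom and grace.",
  "The queen sat upon the golden throne in the palace.",
  "The king governed his realm with fairness and strength.",
  "The emperor commanded the empire from his royal court.",
  "The sovereign reigned over the prosperous nation.",
  "The ruler administered the territory with just laws.",
  "The prince inherited the crown from his noble father.",
  "The duchess presided over the grand ceremony."]

def motion_cluster : List String := [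
  "The athlete sprinted across the finish line swiftly.",
  "The runner dashed through the winding forest path.",
  "The dancer leaped gracefully across the wooden stage.",
  "The horse galloped over the green meadow quickly.",
  "The cheetah raced across the African savanna.",
  "The swimmer glided through the crystal clear water.",
  "The cyclist pedaled up the steep mountain road.",
  "The skater slid across the frozen ice rink."]

def nature_cluster : List String := [
  "The ancient oak tree towered over the peaceful forest.",
  "The mighty redwood grew tall in the misty grove.",
  "The willow branches swayed gently by the river.",
  "The pine needles carpeted the quiet woodland floor.",
  "The maple leaves turned brilliant colors in autumn.",
  "The birch bark gleamed white in the morning light.",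
  "The cedar forest filled the air with fragrance.",
  "The elm branches spread wide over the garden."]

def thought_cluster : List String := [
  "The philosopher contemplated the nature of existence.",
  "The thinker pondered the mysteries of consciousness.",
  "The scholar reflected on ancient wisdom traditions.",
  "The sage meditated upon the meaning of life.",
  "The intellectual analyzed complex theoretical problems.",
  "The theorist considered abstract mathematical concepts.",
  "The academic studied the foundations of knowledge.",
  "The visionary imagined possibilities beyond reality."]

def all_clusters : List String :=
  royalty_cluster ++ motion_cluster ++ nature_cluster ++ thought_cluster

-- used by aLoop's termination proof
theorem pvStrLen_nonneg (s : String) : 0 ≤ PySem.Str.len s := by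
  simp [PySem.Str.len]

-- the while loop of A; `.getD ""` is never used: idx % len(all_clusters) is always in range
def aLoop (target : Int) (corpus : List String) (current_size : Int) (idx : Int) : List String :=
  if current_size < target then
    let sentence := (PySem.List.pyGet? all_clusters
        (PySem.Int.mod idx (all_clusters.length : Int))).getD ""
    aLoop target (corpus ++ [sentence]) (current_size + PySem.Str.len sentence + 1) (idx + 1)
  else corpus
termination_by (target - current_size).toNat
decreasing_by
  have := pvStrLen_nonneg ((PySem.List.pyGet? all_clusters
      (PySem.Int.mod idx (all_clusters.length : Int))).getD "")
  omega

def generate_semantic_corpus (target_size : Int) : String :=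
  PySem.Str.slice (PySem.Str.join " " (aLoop target_size [] 0 0)) none (some target_size)

-- ===== PORT B =====
-- the final for-loop of Source B: append sentences until acc >= rem (break)
def bScan (rem : Int) (acc : Int) : List String → List String
  | [] => []
  | s :: rest =>
    s :: (if rem ≤ acc + PySem.Str.len s + 1 then []
          else bScan rem (acc + PySem.Str.len s + 1) rest)

def generate_semantic_corpus_alt (target_size : Int) : String :=
  if target_size ≤ 0 then "" else
    let cycle_cost : Int := (all_clusters.map (fun s => PySem.Str.len s + 1)).sum
    let q : Int := PySem.Int.floordiv (target_size - 1) cycle_cost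
    let rem : Int := target_size - q * cycle_cost
    let parts : List String := (List.replicate q.toNat all_clusters).flatten ++ bScan rem 0 all_clusters
    PySem.Str.slice (PySem.Str.join " " parts) none (some target_size)

-- ===== PRECONDITION & SPEC =====
def Spec_generate_semantic_corpus (target_size : Int) (out : String) : Prop := out = generate_semantic_corpus_alt target_size
instance (target_size : Int) (out : String) : Decidable (Spec_generate_semantic_corpus target_size out) := by unfold Spec_generate_semantic_corpus; infer_instance

-- ===== CLAIM (what is proved, stated in full; the proofs are below) =====
def Claim_equal_generate_semantic_corpus : Prop := ∀ (target_size : Int), Dom_generate_semantic_corpus target_size → Spec_generate_semantic_corpus target_size (generate_semantic_corpus target_size)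

-- ===== LEMMAS AND PROOFS =====

-- the suffix of sentences A's loop still appends when target - current_size = d
def takeN (d : Int) (idx : Int) : List String :=
  if 0 < d then
    let sentence := (PySem.List.pyGet? all_clusters
        (PySem.Int.mod idx (all_clusters.length : Int))).getD ""
    sentence :: takeN (d - (PySem.Str.len sentence + 1)) (idx + 1)
  else []
termination_by d.toNat
decreasing_by
  have := pvStrLen_nonneg ((PySem.List.pyGet? all_clusters
      (PySem.Int.mod idx (all_clusters.length : Int))).getD "")
  omega

-- the same take-until-budget-exhausted shape over one explicit list
def takeW (d : Int) : List String → List String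
  | [] => []
  | s :: rest => if 0 < d then s :: takeW (d - (PySem.Str.len s + 1)) rest else []

def weight (L : List String) : Int := (L.map (fun s => PySem.Str.len s + 1)).sum

theorem takeN_pos {d : Int} (idx : Int) (h : 0 < d) :
    takeN d idx =
      (PySem.List.pyGet? all_clusters (PySem.Int.mod idx (all_clusters.length : Int))).getD "" ::
        takeN (d - (PySem.Str.len ((PySem.List.pyGet? all_clusters
          (PySem.Int.mod idx (all_clusters.length : Int))).getD "") + 1)) (idx + 1) := by
  rw [takeN]; simp [h]

theorem takeN_nonpos {d : Int} (idx : Int) (h : d ≤ 0) : takeN d idx = [] := by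
  rw [takeN]; simp [show ¬ 0 < d by omega]

theorem weight_nonneg (L : List String) : 0 ≤ weight L := by
  induction L with
  | nil => simp [weight]
  | cons s rest ih =>
    have := pvStrLen_nonneg s
    simp only [weight, List.map_cons, List.sum_cons] at *
    omega

theorem weight_cons (s : String) (L : List String) :
    weight (s :: L) = (PySem.Str.len s + 1) + weight L := by
  simp [weight]

theorem takeW_nonpos {d : Int} (L : List String) (h : d ≤ 0) : takeW d L = [] := by
  cases L with
  | nil => rfl
  | cons s rest => simp [takeW, show ¬ 0 < d by omega]

theorem takeW_all {d : Int} (L : List String) (h : weight L ≤ d) : takeW d L = L := by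
  induction L generalizing d with
  | nil => rfl
  | cons s rest ih =>
    have hs := pvStrLen_nonneg s
    have hw := weight_nonneg rest
    rw [weight_cons] at h
    simp only [takeW, if_pos (show 0 < d by omega)]
    rw [ih (by omega)]

-- the aLoop result is its accumulator plus the pure suffix takeN
theorem aLoop_eq (target current_size idx : Int) (corpus : List String) :
    aLoop target corpus current_size idx = corpus ++ takeN (target - current_size) idx := by
  fun_induction aLoop target corpus current_size idx with
  | case1 corpus current_size idx h s ih =>
    rw [ih, takeN_pos idx (by omega)]
    have hs : (PySem.List.pyGet? all_clusters
        (PySem.Int.mod idx (all_clusters.length : Int))).getD "" = s := rfl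
    rw [hs]
    have harg : target - (current_size + PySem.Str.len s + 1)
        = target - current_size - (PySem.Str.len s + 1) := by ring
    rw [harg]
    simp
  | case2 corpus current_size idx h =>
    rw [takeN_nonpos idx (by omega)]
    simp

-- one segment of a cycle: from position i, takeN consumes the suffix L = all_clusters.drop i
-- and, if budget remains after the cycle, continues at the next multiple of 32
theorem takeN_seg (L : List String) (i : Nat) (m d : Int) (_hm : 0 ≤ m)
    (h32 : i + L.length = 32) (hL : L = all_clusters.drop i) :
    takeN d (32 * m + (i : Int)) =
      takeW d L ++ (if weight L < d then takeN (d - weight L) (32 * (m + 1)) else []) := by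
  induction L generalizing i d with
  | nil =>
    have hi : i = 32 := by simpa using h32
    subst hi
    have hw0 : weight ([] : List String) = 0 := rfl
    by_cases hd : 0 < d
    · rw [hw0, if_pos (by omega)]
      have : (32 * m + ((32 : Nat) : Int)) = 32 * (m + 1) := by push_cast; ring
      rw [this]
      simp [takeW]
    · rw [takeN_nonpos _ (by omega), hw0, if_neg (by omega)]
      rfl
  | cons s rest ih =>
    have hi : i < 32 := by
      simp only [List.length_cons] at h32; omega
    have hmod : PySem.Int.mod (32 * m + (i : Int)) (all_clusters.length : Int) = (i : Int) := by
      have hlen : ((all_clusters.length : Nat) : Int) = 32 := by decide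
      rw [hlen, PySem.Int.mod_eq_emod_of_pos (by norm_num)]
      omega
    have hget : (PySem.List.pyGet? all_clusters ((i : Nat) : Int)).getD "" = s := by
      rw [PySem.List.pyGet?_natCast]
      have hh : all_clusters[i]? = some s := by
        rw [← List.head?_drop, ← hL]; rfl
      rw [hh]; rfl
    by_cases hd : 0 < d
    · rw [takeN_pos _ hd, hmod, hget]
      have hidx : (32 * m + (i : Int)) + 1 = 32 * m + (((i + 1 : Nat)) : Int) := by
        push_cast; ring
      rw [hidx,
        ih (i + 1) (d - (PySem.Str.len s + 1))
          (by simp only [List.length_cons] at h32; omega)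
          (by rw [← List.tail_drop, ← hL]; rfl)]
      simp only [takeW, if_pos hd, weight_cons, List.cons_append]
      have harith : d - (PySem.Str.len s + 1) - weight rest
          = d - ((PySem.Str.len s + 1) + weight rest) := by ring
      split_ifs with h1 h2 h2 <;> simp_all <;> omega
    · rw [takeN_nonpos _ (by omega), takeW_nonpos _ (by omega),
        if_neg (by have := weight_nonneg (s :: rest); omega)]
      rfl

-- full cycles peel off by induction on the cycle count
theorem takeN_main (q : Nat) (d m : Int) (hm : 0 ≤ m) (hd : 0 < d)
    (h1 : (q : Int) * weight all_clusters < d)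
    (h2 : d ≤ ((q : Int) + 1) * weight all_clusters) :
    takeN d (32 * m) = (List.replicate q all_clusters).flatten
      ++ takeW (d - (q : Int) * weight all_clusters) all_clusters := by
  induction q generalizing d m with
  | zero =>
    have hseg := takeN_seg all_clusters 0 m d hm (by decide) (by simp)
    simp only [Nat.cast_zero, add_zero] at hseg
    rw [hseg, if_neg (by push_cast at h2; omega)]
    simp
  | succ q ih =>
    have hW : (0 : Int) ≤ weight all_clusters := weight_nonneg _
    have hqW : (0 : Int) ≤ (q : Int) * weight all_clusters :=
      mul_nonneg (by positivity) hW
    push_cast at h1 h2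
    have hWd : weight all_clusters < d := by nlinarith
    have hseg := takeN_seg all_clusters 0 m d hm (by decide) (by simp)
    simp only [Nat.cast_zero, add_zero] at hseg
    rw [hseg, if_pos hWd, takeW_all _ (le_of_lt hWd),
      ih (d - weight all_clusters) (m + 1) (by omega) (by omega)
        (by nlinarith) (by nlinarith)]
    simp only [List.replicate_succ, List.flatten_cons, List.append_assoc]
    congr 3
    push_cast
    ring

-- B's final for-loop is the same take-until-budget shape
theorem bScan_eq (L : List String) (rem acc : Int) (h : acc < rem) :
    bScan rem acc L = takeW (rem - acc) L := by
  induction L generalizing acc with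
  | nil => rfl
  | cons s rest ih =>
    simp only [bScan, takeW, if_pos (show 0 < rem - acc by omega)]
    by_cases hb : rem ≤ acc + PySem.Str.len s + 1
    · rw [if_pos hb, takeW_nonpos _ (by omega)]
    · rw [if_neg hb, ih _ (by omega)]
      have h2 : rem - (acc + PySem.Str.len s + 1) = rem - acc - (PySem.Str.len s + 1) := by ring
      rw [h2]

theorem weight_all : weight all_clusters = 1643 := by decide

theorem slice_empty (t : Int) : PySem.Str.slice "" none (some t) = "" := by
  simp [PySem.Str.slice, PySem.Chars.slice, PySem.List.slice]

-- ===== VERDICT (by name: the statement is the Claim_ definition above) =====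
theorem generate_semantic_corpus_spec : Claim_equal_generate_semantic_corpus := by
  intro target _
  unfold Spec_generate_semantic_corpus generate_semantic_corpus generate_semantic_corpus_alt
  by_cases ht : target ≤ 0
  · rw [if_pos ht, aLoop_eq, takeN_nonpos _ (by omega)]
    simp only [List.nil_append]
    have hj : PySem.Str.join " " [] = "" := rfl
    rw [hj, slice_empty]
  · rw [if_neg ht]
    simp only []
    have hW : (all_clusters.map (fun s => PySem.Str.len s + 1)).sum = weight all_clusters := rfl
    rw [hW]
    have hWv : weight all_clusters = 1643 := weight_all
    obtain ⟨q, hq, hfd⟩ : ∃ q : Int,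
        PySem.Int.floordiv (target - 1) (weight all_clusters) = q ∧
          q * weight all_clusters ≤ target - 1 ∧ target - 1 < (q + 1) * weight all_clusters :=
      ⟨_, rfl, (PySem.Int.floordiv_eq_iff_of_pos (by rw [hWv]; norm_num)).mp rfl⟩
    rw [hq]
    have hq0 : 0 ≤ q := by
      by_contra hneg
      have h1 : q + 1 ≤ 0 := by omega
      have : (q + 1) * weight all_clusters ≤ 0 := by nlinarith [weight_nonneg all_clusters]
      omega
    have hcast : ((q.toNat : Nat) : Int) = q := Int.toNat_of_nonneg hq0
    rw [aLoop_eq]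
    simp only [List.nil_append, sub_zero]
    have h0 : takeN target 0 = takeN target (32 * 0) := by norm_num
    rw [h0, takeN_main q.toNat target 0 (le_refl 0) (by omega)
        (by rw [hcast]; omega) (by rw [hcast]; omega),
      hcast, bScan_eq _ _ _ (by omega), sub_zero]
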